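-- pv_equiv track=rewrite | github.com/KeyWaveTree/Algorithm-Python | HUFS/homework/다항식 계산.py | evaluate_n2
-- ===== SOURCE A (Python) =====
-- def evaluate_n2(A, x):
--     answer = 0
--     for index, value in enumerate(A):
--         mul = 1
--         for i in range(index): mul *= x
--         if index == 0:
--             answer += value
--         else:
--             answer += (value * mul)
--
--     return answer
-- ===== SOURCE B (Python) =====
-- def evaluate_n2(A, x):
--     # Horner's method: one pass from the highest coefficient, no repeated powers.
--     answer = 0
--     for value in reversed(A):
--         answer = answer * x + value
--     return answer
-- ===== Notes on version B (the rewrite author's own statement) =====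
-- stated objective: faster
-- what changed: Replaced the quadratic sum that rebuilds x^index with an inner loop for each term by a single reversed-order Horner pass (answer = answer*x + value).
import Mathlib
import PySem

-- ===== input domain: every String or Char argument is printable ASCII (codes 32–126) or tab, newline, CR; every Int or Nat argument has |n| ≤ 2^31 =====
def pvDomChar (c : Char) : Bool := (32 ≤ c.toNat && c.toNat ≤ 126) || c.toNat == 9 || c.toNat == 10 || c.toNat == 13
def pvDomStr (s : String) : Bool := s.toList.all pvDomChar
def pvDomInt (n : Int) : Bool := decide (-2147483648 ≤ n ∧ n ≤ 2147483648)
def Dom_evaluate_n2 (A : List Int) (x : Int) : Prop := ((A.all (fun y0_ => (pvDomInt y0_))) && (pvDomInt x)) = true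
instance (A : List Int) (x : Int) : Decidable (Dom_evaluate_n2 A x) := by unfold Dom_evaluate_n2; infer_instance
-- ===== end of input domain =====

-- ===== PORT A =====
-- Literal port of A: fold over enumerate(A); mul rebuilt as a range fold for each index.
def evaluate_n2 (A : List Int) (x : Int) : Int :=
  (PySem.List.enumerate A).foldl (fun answer p =>
    let mul := (PySem.List.pyRange 0 p.1 1).foldl (fun m _ => m * x) 1
    if p.1 = 0 then answer + p.2 else answer + p.2 * mul) 0

-- ===== PORT B =====
-- Port of B: Horner's method, a single fold over the reversed coefficient list.
def evaluate_n2_alt (A : List Int) (x : Int) : Int :=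
  A.reverse.foldl (fun answer value => answer * x + value) 0

-- ===== PRECONDITION & SPEC =====
def Spec_evaluate_n2 (A : List Int) (x : Int) (out : Int) : Prop := out = evaluate_n2_alt A x
instance (A : List Int) (x : Int) (out : Int) : Decidable (Spec_evaluate_n2 A x out) := by unfold Spec_evaluate_n2; infer_instance

-- ===== CLAIM (what is proved, stated in full; the proofs are below) =====
def Claim_equal_evaluate_n2 : Prop := ∀ (A : List Int) (x : Int), Dom_evaluate_n2 A x → Spec_evaluate_n2 A x (evaluate_n2 A x)

-- ===== LEMMAS AND PROOFS =====

-- ===== VERDICT (by name: the statement is the Claim_ definition above) =====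
-- poly A x = Σ A[i] * x^i, the common reference value
def pvPoly (A : List Int) (x : Int) : Int :=
  match A with
  | [] => 0
  | a :: t => a + x * pvPoly t x

theorem pvMulFold (l : List Int) (x c : Int) :
    l.foldl (fun m _ => m * x) c = c * x ^ l.length := by
  induction l generalizing c with
  | nil => simp
  | cons a t ih => simp [List.foldl, ih, pow_succ]; ring

theorem pvAFold (A : List Int) (x : Int) : ∀ (k : Nat) (ans : Int),
    (PySem.List.enumerate A (k : Int)).foldl (fun answer p =>
      let mul := (PySem.List.pyRange 0 p.1 1).foldl (fun m _ => m * x) 1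
      if p.1 = 0 then answer + p.2 else answer + p.2 * mul) ans
      = ans + x ^ k * pvPoly A x := by
  induction A with
  | nil => intro k ans; simp [PySem.List.enumerate_nil, pvPoly]
  | cons a t ih =>
    intro k ans
    rw [PySem.List.enumerate_cons]
    simp only [List.foldl]
    have hlen : (PySem.List.pyRange 0 (k : Int) 1).length = k := by
      rw [PySem.List.pyRange_one 0 (k : Int)]; simp
    have hmul : (PySem.List.pyRange 0 (k : Int) 1).foldl (fun m _ => m * x) 1 = x ^ k := by
      rw [pvMulFold, hlen, one_mul]
    have hk1 : ((k : Int) + 1) = ((k + 1 : Nat) : Int) := by push_cast; ring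
    rw [hk1]
    by_cases hk : (k : Int) = 0
    · have hk0 : k = 0 := by exact_mod_cast hk
      subst hk0
      simp only [hk, if_pos]
      rw [ih 1 (ans + a)]
      simp [pvPoly]; ring
    · simp only [hk, if_false, hmul]
      rw [ih (k + 1) (ans + a * x ^ k)]
      simp [pvPoly, pow_succ]; ring

theorem pvBFold (A : List Int) (x : Int) :
    A.reverse.foldl (fun answer value => answer * x + value) 0 = pvPoly A x := by
  rw [List.foldl_reverse]
  induction A with
  | nil => rfl
  | cons a t ih => simp [List.foldr, pvPoly, ih]; ring

-- ===== VERDICT (by name: the statement is the Claim_ definition above) =====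
theorem evaluate_n2_spec : Claim_equal_evaluate_n2 := by
  intro A x _
  unfold Spec_evaluate_n2 evaluate_n2 evaluate_n2_alt
  have hA := pvAFold A x 0 0
  simp only [Nat.cast_zero] at hA
  rw [hA, pvBFold]
  simp
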